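-- pv_equiv track=rewrite | github.com/pypi-data/pypi-mirror-400 | packages/ai-logmaster/ai_logmaster-1.0.2-py3-none-any.whl/ai_logmaster/core/doc_fetcher.py | _filter_relevant_docs
-- ===== SOURCE A (Python) =====
-- def _filter_relevant_docs(docs: str, error_msg: str, library: str, error_name: str = "") -> str:
--     """Filter documentation to keep only relevant parts"""
--     paragraphs = docs.split('\n')
--     relevant_parts = []
--
--     # Extract keywords from error message
--     error_keywords = error_msg.lower().split()[:8]
--
--     # Add error name as a high-priority keyword
--     if error_name:
--         error_keywords.insert(0, error_name.lower())
--
--     # Noise patterns to skip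
--     noise_patterns = [
--         'woocommerce', 'order emails', 'demodulate', 'radios',
--         'subscribe', 'newsletter', 'advertisement', 'sponsored',
--         'buy now', 'click here', 'learn more', 'get started',
--         'sign up', 'free trial', 'pricing', 'download now'
--     ]
--
--     for para in paragraphs:
--         para_lower = para.lower()
--
--         # Skip noise/marketing content
--         if any(noise in para_lower for noise in noise_patterns):
--             continue
--
--         # Skip very short paragraphs (likely fragments)
--         if len(para.strip()) < 30:
--             continue
--
--         # Skip paragraphs that are just dates or metadata
--         if para.strip().startswith(('Jan ', 'Feb ', 'Mar ', 'Apr ', 'May ', 'Jun ',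
--                                     'Jul ', 'Aug ', 'Sep ', 'Oct ', 'Nov ', 'Dec ',
--                                     '1 ', '2 ', '3 ', '4 ', '5 ', '6 ', '7 ', '8 ', '9 ',
--                                     '0 ', '10 ', '11 ', '12 ')):
--             continue
--
--         score = 0
--
--         # High priority: contains error name
--         if error_name and error_name.lower() in para_lower:
--             score += 5
--
--         # High priority: contains multiple error keywords
--         keyword_matches = sum(1 for keyword in error_keywords if keyword in para_lower and len(keyword) > 2)
--         score += keyword_matches * 2
--
--         # Medium priority: contains library name
--         if library and library.lower() in para_lower:
--             score += 3
--
--         # Medium priority: contains solution/technical keywords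
--         technical_keywords = ["import", "defined", "module", "class", "function", "variable",
--                              "attribute", "method", "exception", "traceback", "stack"]
--         if any(word in para_lower for word in technical_keywords):
--             score += 2
--
--         # Low priority: contains general solution keywords
--         if any(word in para_lower for word in ["fix", "solution", "resolve", "cause", "error"]):
--             score += 1
--
--         # Only include paragraphs with strong relevance
--         if score >= 4:  # Increased threshold from 2 to 4
--             relevant_parts.append(para)
--
--     # If we have relevant parts, return them
--     if relevant_parts:
--         filtered = '\n'.join(relevant_parts)
--         return filtered
--
--     # If filtering was too aggressive, return top scored paragraphs
--     # Re-score with lower threshold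
--     scored_paras = []
--     for para in paragraphs:
--         para_lower = para.lower()
--         if len(para.strip()) < 30:
--             continue
--         if any(noise in para_lower for noise in noise_patterns):
--             continue
--
--         score = 0
--         if error_name and error_name.lower() in para_lower:
--             score += 3
--         keyword_matches = sum(1 for keyword in error_keywords if keyword in para_lower)
--         score += keyword_matches
--
--         if score > 0:
--             scored_paras.append((score, para))
--
--     # Return top 5 paragraphs by score
--     scored_paras.sort(reverse=True, key=lambda x: x[0])
--     top_paras = [para for score, para in scored_paras[:5]]
--
--     return '\n'.join(top_paras) if top_paras else docs[:1000]
-- ===== SOURCE B (Python) =====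
-- def _filter_relevant_docs(docs: str, error_msg: str, library: str, error_name: str = "") -> str:
--     """One table-building pass: each paragraph gets filter flags plus its strict
--     and loose scores; selection is then table-driven instead of re-scanning."""
--     noise_patterns = [
--         'woocommerce', 'order emails', 'demodulate', 'radios',
--         'subscribe', 'newsletter', 'advertisement', 'sponsored',
--         'buy now', 'click here', 'learn more', 'get started',
--         'sign up', 'free trial', 'pricing', 'download now'
--     ]
--     date_prefixes = ('Jan ', 'Feb ', 'Mar ', 'Apr ', 'May ', 'Jun ',
--                      'Jul ', 'Aug ', 'Sep ', 'Oct ', 'Nov ', 'Dec ',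
--                      '1 ', '2 ', '3 ', '4 ', '5 ', '6 ', '7 ', '8 ', '9 ',
--                      '0 ', '10 ', '11 ', '12 ')
--     technical_keywords = ["import", "defined", "module", "class", "function", "variable",
--                           "attribute", "method", "exception", "traceback", "stack"]
--     solution_keywords = ["fix", "solution", "resolve", "cause", "error"]
--
--     error_keywords = error_msg.lower().split()[:8]
--     if error_name:
--         error_keywords.insert(0, error_name.lower())
--
--     records = []
--     for para in docs.split('\n'):
--         pl = para.lower()
--         noisy = any(n in pl for n in noise_patterns)
--         short = len(para.strip()) < 30
--         datey = para.strip().startswith(date_prefixes)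
--         strict = 0
--         if error_name and error_name.lower() in pl:
--             strict += 5
--         strict += 2 * sum(1 for k in error_keywords if k in pl and len(k) > 2)
--         if library and library.lower() in pl:
--             strict += 3
--         if any(w in pl for w in technical_keywords):
--             strict += 2
--         if any(w in pl for w in solution_keywords):
--             strict += 1
--         loose = 0
--         if error_name and error_name.lower() in pl:
--             loose += 3
--         loose += sum(1 for k in error_keywords if k in pl)
--         records.append((para, noisy, short, datey, strict, loose))
--
--     strict_sel = [p for (p, noisy, short, datey, strict, _) in records
--                   if not noisy and not short and not datey and strict >= 4]
--     if strict_sel: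
--         return '\n'.join(strict_sel)
--
--     loose_sel = [(loose, p) for (p, noisy, short, _, _, loose) in records
--                  if not short and not noisy and loose > 0]
--     loose_sel.sort(reverse=True, key=lambda x: x[0])
--     top = [p for _, p in loose_sel[:5]]
--     return '\n'.join(top) if top else docs[:1000]
-- ===== Notes on version B (the rewrite author's own statement) =====
-- stated objective: alternative
-- what changed: A's two sequential conditional re-scanning passes over the paragraphs are replaced by a single table-building pass that records each paragraph's filter flags plus its strict and loose scores, followed by table-driven selection (strict join, else sorted top-5, else docs[:1000]).
import Mathlib
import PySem

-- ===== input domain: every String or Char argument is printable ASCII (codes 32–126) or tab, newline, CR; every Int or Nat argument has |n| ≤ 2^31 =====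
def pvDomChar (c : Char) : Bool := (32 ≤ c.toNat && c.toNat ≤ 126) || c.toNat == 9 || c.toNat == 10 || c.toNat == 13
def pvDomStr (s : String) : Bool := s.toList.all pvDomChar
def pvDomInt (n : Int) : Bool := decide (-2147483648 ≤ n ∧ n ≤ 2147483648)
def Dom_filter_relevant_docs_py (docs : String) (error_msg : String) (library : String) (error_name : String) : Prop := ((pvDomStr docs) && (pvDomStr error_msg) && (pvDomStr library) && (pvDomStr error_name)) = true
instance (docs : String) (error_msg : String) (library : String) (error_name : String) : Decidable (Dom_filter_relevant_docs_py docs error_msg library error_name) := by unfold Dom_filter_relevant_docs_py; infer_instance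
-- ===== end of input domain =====

-- B replaces A's two sequential conditional re-scanning passes over the paragraphs by one
-- table-building pass (flags + strict/loose scores per paragraph) and table-driven selection;
-- objective: alternative decomposition, same results.

-- shared literal constants from the Python source
def pvNoise : List String :=
  ["woocommerce", "order emails", "demodulate", "radios",
   "subscribe", "newsletter", "advertisement", "sponsored",
   "buy now", "click here", "learn more", "get started",
   "sign up", "free trial", "pricing", "download now"]
def pvDates : List String :=
  ["Jan ", "Feb ", "Mar ", "Apr ", "May ", "Jun ",
   "Jul ", "Aug ", "Sep ", "Oct ", "Nov ", "Dec ",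
   "1 ", "2 ", "3 ", "4 ", "5 ", "6 ", "7 ", "8 ", "9 ",
   "0 ", "10 ", "11 ", "12 "]
def pvTech : List String :=
  ["import", "defined", "module", "class", "function", "variable",
   "attribute", "method", "exception", "traceback", "stack"]
def pvSol : List String := ["fix", "solution", "resolve", "cause", "error"]

-- ===== PORT A =====
-- literal transliteration: first conditional scoring pass appending to relevant_parts,
-- then (only if it is empty) a second re-scoring pass, sort, top 5, join / docs[:1000]
def filter_relevant_docs_py (docs : String) (error_msg : String) (library : String) (error_name : String) : String :=
  let paragraphs : List String := (PySem.Str.split? docs "\n").getD []   -- sep "\n" ≠ "": never none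
  let kws0 : List String := PySem.List.slice (PySem.Str.split₀ (PySem.Str.lower error_msg)) none (some 8)
  let error_keywords : List String :=
    if error_name == "" then kws0 else PySem.Str.lower error_name :: kws0
  let relevant_parts : List String :=
    paragraphs.foldl (fun acc para =>
      let pl := PySem.Str.lower para
      if pvNoise.any (fun n => PySem.Str.isIn n pl) then acc
      else if decide (PySem.Str.len (PySem.Str.strip para) < 30) then acc
      else if pvDates.any (fun p => PySem.Str.startswith (PySem.Str.strip para) p) then acc
      else
        let score : Int :=
          (if !(error_name == "") && PySem.Str.isIn (PySem.Str.lower error_name) pl then 5 else 0)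
          + (error_keywords.countP (fun k => PySem.Str.isIn k pl && decide (2 < PySem.Str.len k)) : Int) * 2
          + (if !(library == "") && PySem.Str.isIn (PySem.Str.lower library) pl then 3 else 0)
          + (if pvTech.any (fun w => PySem.Str.isIn w pl) then 2 else 0)
          + (if pvSol.any (fun w => PySem.Str.isIn w pl) then 1 else 0)
        if decide (4 ≤ score) then acc ++ [para] else acc) []
  if !relevant_parts.isEmpty then PySem.Str.join "\n" relevant_parts
  else
    let scored_paras : List (Int × String) :=
      paragraphs.foldl (fun acc para =>
        let pl := PySem.Str.lower para
        if decide (PySem.Str.len (PySem.Str.strip para) < 30) then acc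
        else if pvNoise.any (fun n => PySem.Str.isIn n pl) then acc
        else
          let score : Int :=
            (if !(error_name == "") && PySem.Str.isIn (PySem.Str.lower error_name) pl then 3 else 0)
            + (error_keywords.countP (fun k => PySem.Str.isIn k pl) : Int)
          if decide (0 < score) then acc ++ [(score, para)] else acc) []
    let top_paras : List String :=
      (PySem.List.slice (PySem.List.sorted scored_paras (fun x => x.1) true) none (some 5)).map (fun x => x.2)
    if !top_paras.isEmpty then PySem.Str.join "\n" top_paras
    else PySem.Str.slice docs none (some 1000)

-- ===== PORT B =====
-- per-paragraph record: (paragraph, noisy?, short?, date-like?, strict score, loose score)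
def pvRecord (error_keywords : List String) (library : String) (error_name : String)
    (para : String) : String × Bool × Bool × Bool × Int × Int :=
  let pl := PySem.Str.lower para
  let noisy := pvNoise.any (fun n => PySem.Str.isIn n pl)
  let short := decide (PySem.Str.len (PySem.Str.strip para) < 30)
  let datey := pvDates.any (fun p => PySem.Str.startswith (PySem.Str.strip para) p)
  let strict : Int :=
    (if !(error_name == "") && PySem.Str.isIn (PySem.Str.lower error_name) pl then 5 else 0)
    + (error_keywords.countP (fun k => PySem.Str.isIn k pl && decide (2 < PySem.Str.len k)) : Int) * 2
    + (if !(library == "") && PySem.Str.isIn (PySem.Str.lower library) pl then 3 else 0)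
    + (if pvTech.any (fun w => PySem.Str.isIn w pl) then 2 else 0)
    + (if pvSol.any (fun w => PySem.Str.isIn w pl) then 1 else 0)
  let loose : Int :=
    (if !(error_name == "") && PySem.Str.isIn (PySem.Str.lower error_name) pl then 3 else 0)
    + (error_keywords.countP (fun k => PySem.Str.isIn k pl) : Int)
  (para, noisy, short, datey, strict, loose)

def filter_relevant_docs_py_alt (docs : String) (error_msg : String) (library : String) (error_name : String) : String :=
  let paragraphs : List String := (PySem.Str.split? docs "\n").getD []
  let kws0 : List String := PySem.List.slice (PySem.Str.split₀ (PySem.Str.lower error_msg)) none (some 8)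
  let error_keywords : List String :=
    if error_name == "" then kws0 else PySem.Str.lower error_name :: kws0
  let records := paragraphs.map (pvRecord error_keywords library error_name)
  let strict_sel : List String :=
    (records.filter (fun r => !r.2.1 && !r.2.2.1 && !r.2.2.2.1 && decide (4 ≤ r.2.2.2.2.1))).map (fun r => r.1)
  if !strict_sel.isEmpty then PySem.Str.join "\n" strict_sel
  else
    let loose_sel : List (Int × String) :=
      (records.filter (fun r => !r.2.2.1 && !r.2.1 && decide (0 < r.2.2.2.2.2))).map (fun r => (r.2.2.2.2.2, r.1))
    let top : List String :=
      (PySem.List.slice (PySem.List.sorted loose_sel (fun x => x.1) true) none (some 5)).map (fun x => x.2)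
    if !top.isEmpty then PySem.Str.join "\n" top
    else PySem.Str.slice docs none (some 1000)

-- ===== PRECONDITION & SPEC =====
def Spec_filter_relevant_docs_py (docs : String) (error_msg : String) (library : String) (error_name : String) (out : String) : Prop := out = filter_relevant_docs_py_alt docs error_msg library error_name
instance (docs : String) (error_msg : String) (library : String) (error_name : String) (out : String) : Decidable (Spec_filter_relevant_docs_py docs error_msg library error_name out) := by unfold Spec_filter_relevant_docs_py; infer_instance

-- ===== CLAIM (what is proved, stated in full; the proofs are below) =====
def Claim_equal_filter_relevant_docs_py : Prop := ∀ (docs : String) (error_msg : String) (library : String) (error_name : String), Dom_filter_relevant_docs_py docs error_msg library error_name → Spec_filter_relevant_docs_py docs error_msg library error_name (filter_relevant_docs_py docs error_msg library error_name)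

-- ===== LEMMAS AND PROOFS =====

-- A's first pass (a fold with three skip-guards and an append-if) is a filter
theorem pvFoldA1 (c1 c2 c3 g : String → Bool) (paras : List String) (acc : List String) :
    paras.foldl (fun acc p =>
      if c1 p then acc else if c2 p then acc else if c3 p then acc
      else if g p then acc ++ [p] else acc) acc
    = acc ++ paras.filter (fun p => !c1 p && !c2 p && !c3 p && g p) := by
  induction paras generalizing acc with
  | nil => simp
  | cons x xs ih =>
    simp only [List.foldl_cons, List.filter_cons]
    by_cases h1 : c1 x <;> by_cases h2 : c2 x <;> by_cases h3 : c3 x <;> by_cases h4 : g x <;>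
      simp [h1, h2, h3, h4, ih]

-- A's second pass is a filter followed by a map to (score, para)
theorem pvFoldA2 (c1 c2 g : String → Bool) (e : String → Int × String) (paras : List String)
    (acc : List (Int × String)) :
    paras.foldl (fun acc p =>
      if c1 p then acc else if c2 p then acc
      else if g p then acc ++ [e p] else acc) acc
    = acc ++ (paras.filter (fun p => !c1 p && !c2 p && g p)).map e := by
  induction paras generalizing acc with
  | nil => simp
  | cons x xs ih =>
    simp only [List.foldl_cons, List.filter_cons]
    by_cases h1 : c1 x <;> by_cases h2 : c2 x <;> by_cases h3 : g x <;>
      simp [h1, h2, h3, ih]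

-- B's filter-over-records is a filter over the paragraphs themselves
theorem pvRecFilter {γ δ : Type} (f : String → String × γ) (q : String × γ → Bool)
    (g : String × γ → δ) (xs : List String) :
    ((xs.map f).filter q).map g = (xs.filter (fun x => q (f x))).map (fun x => g (f x)) := by
  induction xs with
  | nil => rfl
  | cons x xs ih =>
    simp only [List.map_cons, List.filter_cons]
    by_cases h : q (f x) <;> simp [h, ih]

-- the two selection pipelines agree for ANY paragraph list and keyword list
set_option maxHeartbeats 2000000 in
theorem pvCore (docs : String) (library : String) (error_name : String)
    (paragraphs error_keywords : List String) :
    (let relevant_parts : List String :=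
      paragraphs.foldl (fun acc para =>
        let pl := PySem.Str.lower para
        if pvNoise.any (fun n => PySem.Str.isIn n pl) then acc
        else if decide (PySem.Str.len (PySem.Str.strip para) < 30) then acc
        else if pvDates.any (fun p => PySem.Str.startswith (PySem.Str.strip para) p) then acc
        else
          let score : Int :=
            (if !(error_name == "") && PySem.Str.isIn (PySem.Str.lower error_name) pl then 5 else 0)
            + (error_keywords.countP (fun k => PySem.Str.isIn k pl && decide (2 < PySem.Str.len k)) : Int) * 2
            + (if !(library == "") && PySem.Str.isIn (PySem.Str.lower library) pl then 3 else 0)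
            + (if pvTech.any (fun w => PySem.Str.isIn w pl) then 2 else 0)
            + (if pvSol.any (fun w => PySem.Str.isIn w pl) then 1 else 0)
          if decide (4 ≤ score) then acc ++ [para] else acc) []
    if !relevant_parts.isEmpty then PySem.Str.join "\n" relevant_parts
    else
      let scored_paras : List (Int × String) :=
        paragraphs.foldl (fun acc para =>
          let pl := PySem.Str.lower para
          if decide (PySem.Str.len (PySem.Str.strip para) < 30) then acc
          else if pvNoise.any (fun n => PySem.Str.isIn n pl) then acc
          else
            let score : Int :=
              (if !(error_name == "") && PySem.Str.isIn (PySem.Str.lower error_name) pl then 3 else 0)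
              + (error_keywords.countP (fun k => PySem.Str.isIn k pl) : Int)
            if decide (0 < score) then acc ++ [(score, para)] else acc) []
      let top_paras : List String :=
        (PySem.List.slice (PySem.List.sorted scored_paras (fun x => x.1) true) none (some 5)).map (fun x => x.2)
      if !top_paras.isEmpty then PySem.Str.join "\n" top_paras
      else PySem.Str.slice docs none (some 1000))
    =
    (let records := paragraphs.map (pvRecord error_keywords library error_name)
    let strict_sel : List String :=
      (records.filter (fun r => !r.2.1 && !r.2.2.1 && !r.2.2.2.1 && decide (4 ≤ r.2.2.2.2.1))).map (fun r => r.1)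
    if !strict_sel.isEmpty then PySem.Str.join "\n" strict_sel
    else
      let loose_sel : List (Int × String) :=
        (records.filter (fun r => !r.2.2.1 && !r.2.1 && decide (0 < r.2.2.2.2.2))).map (fun r => (r.2.2.2.2.2, r.1))
      let top : List String :=
        (PySem.List.slice (PySem.List.sorted loose_sel (fun x => x.1) true) none (some 5)).map (fun x => x.2)
      if !top.isEmpty then PySem.Str.join "\n" top
      else PySem.Str.slice docs none (some 1000)) := by
  simp only []
  rw [pvFoldA1, pvFoldA2, pvRecFilter, pvRecFilter]
  simp only [pvRecord, List.nil_append, List.map_id']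
  rfl

-- ===== VERDICT (by name: the statement is the Claim_ definition above) =====
set_option maxHeartbeats 1000000 in
theorem filter_relevant_docs_py_spec : Claim_equal_filter_relevant_docs_py := by
  intro docs error_msg library error_name _hdom
  show _ = _
  exact pvCore docs library error_name ((PySem.Str.split? docs "\n").getD [])
    (if error_name == "" then PySem.List.slice (PySem.Str.split₀ (PySem.Str.lower error_msg)) none (some 8)
     else PySem.Str.lower error_name :: PySem.List.slice (PySem.Str.split₀ (PySem.Str.lower error_msg)) none (some 8))
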